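-- pv_equiv track=rewrite | github.com/TOMOCHIN4/ITjujiryou | src/main.py | _parse_serve_args
-- ===== SOURCE A (Python) =====
-- def _parse_serve_args(argv: list[str]) -> tuple[str, int]:
--     host = "127.0.0.1"
--     port = 8000
--     i = 0
--     while i < len(argv):
--         a = argv[i]
--         if a == "--host" and i + 1 < len(argv):
--             host = argv[i + 1]
--             i += 2
--         elif a == "--port" and i + 1 < len(argv):
--             port = int(argv[i + 1])
--             i += 2
--         else:
--             i += 1
--     return host, port
-- ===== SOURCE B (Python) =====
-- def _parse_serve_args(argv: list[str]) -> tuple[str, int]: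
--     # stage 1: lex argv into (flag, value) assignment pairs via a stack
--     assigns = []
--     stack = list(argv)
--     stack.reverse()
--     while stack:
--         a = stack.pop()
--         if a in ("--host", "--port") and stack:
--             assigns.append((a, stack.pop()))
--     # stage 2: defaults overridden dict-style, last assignment wins; parse port once
--     opts = {"--host": "127.0.0.1", "--port": "8000"}
--     opts.update(assigns)
--     return opts["--host"], int(opts["--port"])
-- ===== Notes on version B (the rewrite author's own statement) =====
-- stated objective: alternative
-- what changed: Replaces A's single-pass index loop with mutable host/port state by two staged passes: a lexer that pairs each flag with its consumed value token, then a dict of defaults updated last-wins, with the port parsed once at the end.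
-- outside the precondition, e.g. on _parse_serve_args(['--port', 'x']): A raises ValueError, B raises ValueError; on _parse_serve_args(['--host', '--port', 'x']): A returns ('--port', 8000), B returns ('--port', 8000)
import Mathlib
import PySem

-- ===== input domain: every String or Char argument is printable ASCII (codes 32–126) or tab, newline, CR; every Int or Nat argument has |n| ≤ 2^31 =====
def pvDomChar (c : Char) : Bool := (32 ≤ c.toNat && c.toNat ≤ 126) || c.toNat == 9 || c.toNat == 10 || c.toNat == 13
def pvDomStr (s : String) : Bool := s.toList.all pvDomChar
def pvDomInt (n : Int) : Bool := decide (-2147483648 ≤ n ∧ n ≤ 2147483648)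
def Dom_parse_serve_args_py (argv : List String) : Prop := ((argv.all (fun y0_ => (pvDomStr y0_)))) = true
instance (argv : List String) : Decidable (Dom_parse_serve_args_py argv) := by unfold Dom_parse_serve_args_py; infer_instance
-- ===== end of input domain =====

-- B replaces A's single index-loop with mutable host/port state by two staged passes:
-- a lexer that pairs each flag with the token it consumes, then a defaults dict updated
-- last-wins with the port parsed once at the end (alternative decomposition, same cost).

-- ===== PORT A =====
-- literal port of A's while-loop: index i, skip by 2 after a flag with a value.
-- int(argv[i+1]) is PySem.Int.ofStr?; where it is none Python raises ValueError — those
-- inputs are excluded by Pre_, so the .getD fallback is never relied on inside the claim.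
def pvGoA (argv : List String) (host : String) (port : Int) (i : Nat) : String × Int :=
  if i < argv.length then
    let a := argv.getD i ""
    if a = "--host" ∧ i + 1 < argv.length then
      pvGoA argv (argv.getD (i + 1) "") port (i + 2)
    else if a = "--port" ∧ i + 1 < argv.length then
      pvGoA argv host ((PySem.Int.ofStr? (argv.getD (i + 1) "")).getD port) (i + 2)
    else
      pvGoA argv host port (i + 1)
  else (host, port)
termination_by argv.length - i
decreasing_by all_goals omega

def parse_serve_args_py (argv : List String) : String × Int :=
  pvGoA argv "127.0.0.1" 8000 0

-- ===== PORT B =====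
-- stage 1 of Source B: the stack is reversed argv popped from the end, i.e. argv consumed
-- from the front — structural recursion; a trailing flag with an empty stack appends nothing.
def pvAssigns : List String → List (String × String)
  | [] => []
  | a :: stack =>
    if a = "--host" ∨ a = "--port" then
      match stack with
      | [] => []
      | v :: stack' => (a, v) :: pvAssigns stack'
    else pvAssigns stack

-- stage 2 of Source B: opts = {defaults}; opts.update(assigns); int(opts["--port"]) at the end.
-- opts["--host"]/opts["--port"] never miss (the keys are in the initial dict), so getD is exact;
-- int(...) is PySem.Int.ofStr? (none = ValueError, excluded by Pre_).
def parse_serve_args_py_alt (argv : List String) : String × Int :=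
  let opts : PySem.Dict String String :=
    PySem.Dict.update (PySem.Dict.ofList [("--host", "127.0.0.1"), ("--port", "8000")])
      (pvAssigns argv)
  (opts.getD "--host" "127.0.0.1",
   (PySem.Int.ofStr? (opts.getD "--port" "8000")).getD 8000)

-- ===== PRECONDITION & SPEC =====
-- Pre_ excludes argv in which some "--port" token is immediately followed by a token that is
-- not a Python integer literal: there A (and B) raise ValueError. This is conservative: it also
-- excludes a few inputs where that "--port" occurrence is itself consumed as a preceding flag's
-- value and A returns normally (see cites), because which occurrence is processed depends on the scan.
def Pre_parse_serve_args_py (argv : List String) : Prop :=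
  ∀ j < argv.length, j + 1 < argv.length → argv.getD j "" = "--port" →
    (PySem.Int.ofStr? (argv.getD (j + 1) "")).isSome = true
instance (argv : List String) : Decidable (Pre_parse_serve_args_py argv) := by
  unfold Pre_parse_serve_args_py; infer_instance

def pvWitness_parse_serve_args_py : List String := ["--host", "h1", "--port", "90"]

def Spec_parse_serve_args_py (argv : List String) (out : String × Int) : Prop := out = parse_serve_args_py_alt argv
instance (argv : List String) (out : String × Int) : Decidable (Spec_parse_serve_args_py argv out) := by unfold Spec_parse_serve_args_py; infer_instance

-- ===== CLAIM =====
def Claim_equal_parse_serve_args_py : Prop := ∀ (argv : List String), Dom_parse_serve_args_py argv → Pre_parse_serve_args_py argv → Spec_parse_serve_args_py argv (parse_serve_args_py argv)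

-- ===== LEMMAS AND PROOFS =====

-- unfold equations of pvAssigns for the three loop shapes
theorem pvAssigns_flag_nil (a : String) (h : a = "--host" ∨ a = "--port") :
    pvAssigns [a] = [] := by
  rw [pvAssigns.eq_def]; simp [h]

theorem pvAssigns_flag_cons (a v : String) (l : List String)
    (h : a = "--host" ∨ a = "--port") :
    pvAssigns (a :: v :: l) = (a, v) :: pvAssigns l := by
  rw [pvAssigns.eq_def]; simp [h]

theorem pvAssigns_skip (a : String) (l : List String)
    (h : ¬(a = "--host" ∨ a = "--port")) :
    pvAssigns (a :: l) = pvAssigns l := by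
  rw [pvAssigns.eq_def]
  cases l <;> simp [h]

-- eager interpreter of the assignment list: exactly the updates A performs, in order
def pvInterp : List (String × String) → String → Int → String × Int
  | [], h, p => (h, p)
  | (k, v) :: ts, h, p =>
    if k = "--host" then pvInterp ts v p
    else pvInterp ts h ((PySem.Int.ofStr? v).getD p)

-- last value assigned to key k in ts, if any
def pvLast? (k : String) : List (String × String) → Option String
  | [] => none
  | (k', v) :: ts =>
    match pvLast? k ts with
    | some w => some w
    | none => if k' = k then some v else none

theorem pvGoA_eq_interp (argv : List String) (k : Nat) :
    ∀ i, argv.length - i ≤ k → ∀ h p,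
      pvGoA argv h p i = pvInterp (pvAssigns (argv.drop i)) h p := by
  induction k with
  | zero =>
    intro i hk h p
    have hlen : argv.length ≤ i := by omega
    rw [pvGoA, List.drop_eq_nil_of_le hlen]
    simp [pvAssigns, pvInterp, Nat.not_lt.mpr hlen]
  | succ k ih =>
    intro i hk h p
    rw [pvGoA]
    by_cases hi : i < argv.length
    · have hdrop : argv.drop i = argv[i] :: argv.drop (i + 1) :=
        List.drop_eq_getElem_cons hi
      have hgd : argv.getD i "" = argv[i] := List.getD_eq_getElem argv "" hi
      by_cases h1 : i + 1 < argv.length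
      · have hdrop1 : argv.drop (i + 1) = argv[i + 1] :: argv.drop (i + 2) :=
          List.drop_eq_getElem_cons h1
        have hgd1 : argv.getD (i + 1) "" = argv[i + 1] := List.getD_eq_getElem argv "" h1
        have e2 := ih (i + 2) (by omega)
        rw [hdrop, hdrop1]
        by_cases ha : argv[i] = "--host"
        · simp [pvAssigns, pvInterp, ha, hi, h1, hgd, hgd1, e2]
        · by_cases hb : argv[i] = "--port"
          · simp [pvAssigns, pvInterp, ha, hb, hi, h1, hgd, e2]
          · have e1 := ih (i + 1) (by omega)
            rw [if_pos hi, if_neg (fun hc => ha (hgd.symm.trans hc.1)),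
                if_neg (fun hc => hb (hgd.symm.trans hc.1)), e1]
            rw [← hdrop1, pvAssigns_skip _ _ (by tauto)]
      · have hdrop1 : argv.drop (i + 1) = [] := List.drop_eq_nil_of_le (by omega)
        have e1 := ih (i + 1) (by omega)
        rw [hdrop]
        by_cases ha : argv[i] = "--host"
        · simp [pvAssigns, pvInterp, ha, hi, h1, e1, hdrop1]
        · by_cases hb : argv[i] = "--port" <;>
            simp [pvAssigns, pvInterp, ha, hb, hi, h1, e1, hdrop1]
    · have hlen : argv.length ≤ i := by omega
      rw [List.drop_eq_nil_of_le hlen]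
      simp [pvAssigns, pvInterp, hi]

theorem pvAssigns_keys (l : List String) :
    ∀ kv ∈ pvAssigns l, kv.1 = "--host" ∨ kv.1 = "--port" := by
  induction l using pvAssigns.induct with
  | case1 => intro kv h; simp [pvAssigns] at h
  | case2 a hflag => intro kv h; rw [pvAssigns_flag_nil a hflag] at h; simp at h
  | case3 a hflag v stack' ih =>
    intro kv h
    rw [pvAssigns_flag_cons a v stack' hflag] at h
    rcases List.mem_cons.mp h with h | h
    · cases h; exact hflag
    · exact ih kv h
  | case4 a stack hflag ih =>
    intro kv h
    rw [pvAssigns_skip a stack hflag] at h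
    exact ih kv h

theorem pvAssigns_port_vals (l : List String) :
    ∀ kv ∈ pvAssigns l, kv.1 = "--port" →
      ∃ j, j + 1 < l.length ∧ l.getD j "" = "--port" ∧ l.getD (j + 1) "" = kv.2 := by
  induction l using pvAssigns.induct with
  | case1 => intro kv h; simp [pvAssigns] at h
  | case2 a hflag => intro kv h; rw [pvAssigns_flag_nil a hflag] at h; simp at h
  | case3 a hflag v stack' ih =>
    intro kv h hk
    rw [pvAssigns_flag_cons a v stack' hflag] at h
    rcases List.mem_cons.mp h with h | h
    · cases h
      exact ⟨0, by simp, by simpa using hk, by simp⟩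
    · obtain ⟨j, hj, hj1, hj2⟩ := ih kv h hk
      refine ⟨j + 2, by simpa using hj, ?_, ?_⟩
      · simpa using hj1
      · simpa using hj2
  | case4 a stack hflag ih =>
    intro kv h hk
    rw [pvAssigns_skip a stack hflag] at h
    obtain ⟨j, hj, hj1, hj2⟩ := ih kv h hk
    refine ⟨j + 1, by simpa using hj, ?_, ?_⟩
    · simpa using hj1
    · simpa using hj2

theorem pvLast?_mem (k : String) : ∀ (ts : List (String × String)) (w : String),
    pvLast? k ts = some w → ∃ kv ∈ ts, kv.1 = k ∧ kv.2 = w := by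
  intro ts
  induction ts with
  | nil => intro w h; simp [pvLast?] at h
  | cons kv ts ih =>
    intro w h
    obtain ⟨k', v⟩ := kv
    cases hrec : pvLast? k ts with
    | some u =>
      have h2 : pvLast? k ((k', v) :: ts) = some u := by rw [pvLast?, hrec]
      rw [h2] at h
      injection h with h
      subst h
      obtain ⟨kv', hm, hk, hv⟩ := ih u hrec
      exact ⟨kv', List.mem_cons_of_mem _ hm, hk, hv⟩
    | none =>
      have h2 : pvLast? k ((k', v) :: ts) = if k' = k then some v else none := by
        rw [pvLast?, hrec]
      rw [h2] at h
      by_cases hk : k' = k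
      · rw [if_pos hk] at h
        injection h with h
        exact ⟨(k', v), List.mem_cons_self, hk, h⟩
      · rw [if_neg hk] at h
        exact absurd h (by simp)

theorem getD_isSome {α : Type} (o : Option α) (h : o.isSome = true) (a b : α) :
    o.getD a = o.getD b := by cases o with
  | none => simp at h
  | some x => rfl

theorem pvInterp_char (ts : List (String × String))
    (hkeys : ∀ kv ∈ ts, kv.1 = "--host" ∨ kv.1 = "--port")
    (hpred : ∀ kv ∈ ts, kv.1 = "--port" → (PySem.Int.ofStr? kv.2).isSome = true) :
    ∀ h p, pvInterp ts h p =
      ((pvLast? "--host" ts).getD h,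
       match pvLast? "--port" ts with
       | none => p
       | some w => (PySem.Int.ofStr? w).getD p) := by
  induction ts with
  | nil => intro h p; simp [pvInterp, pvLast?]
  | cons kv ts ih =>
    intro h p
    obtain ⟨k, v⟩ := kv
    have ihk := fun kv hm => hkeys kv (List.mem_cons_of_mem _ hm)
    have ihp := fun kv hm => hpred kv (List.mem_cons_of_mem _ hm)
    by_cases hk : k = "--host"
    · rw [pvInterp, if_pos hk, ih ihk ihp]
      rw [pvLast?, pvLast?]
      cases hh : pvLast? "--host" ts <;> cases hp : pvLast? "--port" ts <;> simp [hk]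
    · have hk' : k = "--port" := by
        rcases hkeys (k, v) List.mem_cons_self with h' | h'
        · exact absurd h' hk
        · exact h'
      have hv : (PySem.Int.ofStr? v).isSome = true :=
        hpred (k, v) List.mem_cons_self hk'
      rw [pvInterp, if_neg hk, ih ihk ihp]
      rw [pvLast?, pvLast?]
      cases hp : pvLast? "--port" ts with
      | some u =>
        obtain ⟨kv', hm, hku, hvu⟩ := pvLast?_mem _ _ _ hp
        have hu : (PySem.Int.ofStr? u).isSome = true := by
          rw [← hvu]; exact ihp kv' hm hku
        cases hh : pvLast? "--host" ts <;> simp [hk'] <;>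
          exact getD_isSome _ hu _ _
      | none =>
        cases hh : pvLast? "--host" ts <;> simp [hk']

theorem getD_update_last (ts : List (String × String)) :
    ∀ (d : PySem.Dict String String) (k dflt : String),
      (PySem.Dict.update d ts).getD k dflt =
        match pvLast? k ts with
        | some w => w
        | none => d.getD k dflt := by
  induction ts with
  | nil => intro d k dflt; simp [PySem.Dict.update, pvLast?]
  | cons kv ts ih =>
    intro d k dflt
    obtain ⟨k', v⟩ := kv
    have : PySem.Dict.update d ((k', v) :: ts) = PySem.Dict.update (d.insert k' v) ts := rfl
    rw [this, ih, pvLast?]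
    cases hrec : pvLast? k ts with
    | some w => simp
    | none =>
      by_cases hk : k' = k
      · simp [hk]
      · simp [hk, PySem.Dict.getD_insert, Ne.symm hk]

-- ===== VERDICT =====
theorem parse_serve_args_py_spec : Claim_equal_parse_serve_args_py := by
  intro argv _ hpre
  unfold Spec_parse_serve_args_py parse_serve_args_py parse_serve_args_py_alt
  rw [pvGoA_eq_interp argv argv.length 0 (by omega)]
  simp only [List.drop_zero]
  have hpred : ∀ kv ∈ pvAssigns argv, kv.1 = "--port" →
      (PySem.Int.ofStr? kv.2).isSome = true := by
    intro kv hm hk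
    obtain ⟨j, hj, hj1, hj2⟩ := pvAssigns_port_vals argv kv hm hk
    rw [← hj2]; exact hpre j (by omega) hj hj1
  rw [pvInterp_char (pvAssigns argv) (pvAssigns_keys argv) hpred]
  rw [getD_update_last, getD_update_last]
  cases hh : pvLast? "--host" (pvAssigns argv) with
  | some w =>
    cases hp : pvLast? "--port" (pvAssigns argv) with
    | some u =>
      obtain ⟨kv', hm, hku, hvu⟩ := pvLast?_mem _ _ _ hp
      have hu : (PySem.Int.ofStr? u).isSome = true := by
        rw [← hvu]; exact hpred kv' hm hku
      simp
    | none => simp [show PySem.Int.ofStr? ((PySem.Dict.ofList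
        [("--host", "127.0.0.1"), ("--port", "8000")]).getD "--port" "8000") = some 8000 from by decide]
  | none =>
    cases hp : pvLast? "--port" (pvAssigns argv) with
    | some u =>
      obtain ⟨kv', hm, hku, hvu⟩ := pvLast?_mem _ _ _ hp
      have hu : (PySem.Int.ofStr? u).isSome = true := by
        rw [← hvu]; exact hpred kv' hm hku
      simp [show (PySem.Dict.ofList
        [("--host", "127.0.0.1"), ("--port", "8000")]).getD "--host" "127.0.0.1" = "127.0.0.1" from by decide]
    | none => simp [show PySem.Int.ofStr? ((PySem.Dict.ofList
        [("--host", "127.0.0.1"), ("--port", "8000")]).getD "--port" "8000") = some 8000 from by decide,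
        show (PySem.Dict.ofList
        [("--host", "127.0.0.1"), ("--port", "8000")]).getD "--host" "127.0.0.1" = "127.0.0.1" from by decide]
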